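-- pv_equiv track=rewrite | github.com/gowitheflow-1998/on-isotropy-of-contrastive-SRL | analysis_pipeline.py | position_list
-- ===== SOURCE A (Python) =====
-- def position_list(set_of_token, list_of_tokenized_sentences):
--
--     inference_list = {} ## get a dict to store corresponding position (sentence_index, token_index) of words
--     for n in set_of_token:
--         position_list = []
--         for sen_index, sen in enumerate(list_of_tokenized_sentences):
--             if n in sen:
--                 token_index = sen.index(n)
--                 position_list.append((sen_index, token_index)) # store the corresponding sentence index and token index of that word
--         inference_list[n] = position_list
--
--     return inference_list
-- ===== SOURCE B (Python) =====
-- def position_list(set_of_token, list_of_tokenized_sentences):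
--     # Single pass over all sentence tokens: record (sentence_index, first_index)
--     # per token once, then look each requested token up. O(total_tokens + |set_of_token|).
--     occ = {}
--     for sen_index, sen in enumerate(list_of_tokenized_sentences):
--         seen = set()
--         for token_index, tok in enumerate(sen):
--             if tok not in seen:
--                 seen.add(tok)
--                 occ.setdefault(tok, []).append((sen_index, token_index))
--     return {n: occ.get(n, []) for n in set_of_token}
-- ===== Notes on version B (the rewrite author's own statement) =====
-- stated objective: faster
-- what changed: B replaces A's per-token rescan of every sentence (membership test + .index per token) by one single pass over all sentences that builds a token->positions dict recording the first index per sentence, followed by O(1) lookups per requested token.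
import Mathlib
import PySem

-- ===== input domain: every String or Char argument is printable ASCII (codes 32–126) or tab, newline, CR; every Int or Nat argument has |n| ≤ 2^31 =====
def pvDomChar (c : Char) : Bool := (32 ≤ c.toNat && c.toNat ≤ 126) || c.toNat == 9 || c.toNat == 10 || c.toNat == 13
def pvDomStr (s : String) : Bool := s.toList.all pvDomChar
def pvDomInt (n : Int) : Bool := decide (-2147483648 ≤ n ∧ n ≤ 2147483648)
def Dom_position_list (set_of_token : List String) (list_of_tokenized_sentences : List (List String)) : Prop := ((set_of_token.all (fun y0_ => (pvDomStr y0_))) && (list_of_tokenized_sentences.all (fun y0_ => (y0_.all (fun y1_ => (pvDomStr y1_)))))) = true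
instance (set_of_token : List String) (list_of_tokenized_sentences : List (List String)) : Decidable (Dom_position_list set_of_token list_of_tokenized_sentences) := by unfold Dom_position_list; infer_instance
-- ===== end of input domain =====

-- B builds the token->positions dict in ONE pass over all sentence tokens instead of
-- rescanning every sentence for every token; same return value, asymptotically faster.

-- ===== PORT A =====
-- A's inner loop: for sen_index, sen in enumerate(...): if n in sen: append (sen_index, sen.index(n))
def position_list (set_of_token : List String) (list_of_tokenized_sentences : List (List String)) : List (String × List (Int × Int)) :=
  (set_of_token.foldl (fun d n =>
      d.insert n ((PySem.List.enumerate list_of_tokenized_sentences 0).foldl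
        (fun pl p =>
          if p.2.contains n then
            pl ++ [(p.1, (((PySem.List.index? p.2 n).getD 0 : Nat) : Int))]
          else pl) [])) PySem.Dict.empty).items

-- ===== PORT B =====
-- one step of B's inner loop: first occurrence of a token in the current sentence is appended
def plStep (si : Int) (st : PySem.Dict String (List (Int × Int)) × PySem.Set String)
    (q : Int × String) : PySem.Dict String (List (Int × Int)) × PySem.Set String :=
  if PySem.Set.contains st.2 q.2 then st
  else (st.1.modify q.2 [] (· ++ [(si, q.1)]), PySem.Set.add st.2 q.2)

-- B's inner loop over one sentence (sentence index si)
def plSentence (si : Int) (sen : List String) (occ : PySem.Dict String (List (Int × Int))) :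
    PySem.Dict String (List (Int × Int)) :=
  ((PySem.List.enumerate sen 0).foldl (plStep si) (occ, PySem.Set.empty)).1

def position_list_alt (set_of_token : List String) (list_of_tokenized_sentences : List (List String)) : List (String × List (Int × Int)) :=
  let occ := (PySem.List.enumerate list_of_tokenized_sentences 0).foldl
    (fun occ p => plSentence p.1 p.2 occ) PySem.Dict.empty
  (set_of_token.foldl (fun d n => d.insert n (occ.getD n [])) PySem.Dict.empty).items

-- ===== PRECONDITION & SPEC =====
def Spec_position_list (set_of_token : List String) (list_of_tokenized_sentences : List (List String)) (out : List (String × List (Int × Int))) : Prop := out = position_list_alt set_of_token list_of_tokenized_sentences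
instance (set_of_token : List String) (list_of_tokenized_sentences : List (List String)) (out : List (String × List (Int × Int))) : Decidable (Spec_position_list set_of_token list_of_tokenized_sentences out) := by unfold Spec_position_list; infer_instance

-- ===== CLAIM (what is proved, stated in full; the proofs are below) =====
def Claim_equal_position_list : Prop := ∀ (set_of_token : List String) (list_of_tokenized_sentences : List (List String)), Dom_position_list set_of_token list_of_tokenized_sentences → Spec_position_list set_of_token list_of_tokenized_sentences (position_list set_of_token list_of_tokenized_sentences)

-- ===== LEMMAS AND PROOFS =====

-- the position entry contributed by one sentence: nothing if the token is absent,
-- (si, s + index) if it is first found at `index` (s = start offset of the scan)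
def hitList (si s : Int) (o : Option Nat) : List (Int × Int) :=
  match o with
  | some k => [(si, s + (k : Int))]
  | none => []

theorem hitList_map_succ (si s : Int) (o : Option Nat) :
    hitList si s (o.map (· + 1)) = hitList si (s + 1) o := by
  cases o with
  | none => rfl
  | some k =>
    show [(si, s + ((k + 1 : Nat) : Int))] = [(si, s + 1 + (k : Int))]
    have h : s + ((k + 1 : Nat) : Int) = s + 1 + (k : Int) := by push_cast; ring
    rw [h]

-- B's inner loop, characterised: the dict gains exactly the first occurrence of each
-- sentence token not yet in `seen`, at absolute position s + (index in the remaining sentence).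
theorem plStep_fold_getD (si : Int) (sen : List String) :
    ∀ (s : Int) (occ : PySem.Dict String (List (Int × Int))) (seen : PySem.Set String) (t : String),
    (((PySem.List.enumerate sen s).foldl (plStep si) (occ, seen)).1.getD t []) =
      if PySem.Set.contains seen t then occ.getD t []
      else occ.getD t [] ++ hitList si s (PySem.List.index? sen t) := by
  induction sen with
  | nil =>
    intro s occ seen t
    have hn : PySem.List.index? ([] : List String) t = none :=
      (PySem.List.index?_eq_none_iff _ _).2 (by simp)
    rw [PySem.List.enumerate_nil, List.foldl_nil, hn]
    split
    · rfl
    · simp [hitList]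
  | cons x xs ih =>
    intro s occ seen t
    rw [PySem.List.enumerate_cons]
    simp only [List.foldl_cons]
    by_cases hx : PySem.Set.contains seen x
    · -- x already seen this sentence: state unchanged
      have hstep : plStep si (occ, seen) (s, x) = (occ, seen) := by
        simp only [plStep]; rw [if_pos hx]
      rw [hstep, ih]
      by_cases htx : t = x
      · subst htx
        rw [if_pos hx, if_pos hx]
      · rw [PySem.List.index?_cons_of_ne xs (Ne.symm htx), hitList_map_succ]
    · -- x is new: record it and mark seen
      have hstep : plStep si (occ, seen) (s, x) =
          (occ.modify x [] (· ++ [(si, s)]), PySem.Set.add seen x) := by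
        simp only [plStep]; rw [if_neg hx]
      rw [hstep, ih]
      by_cases htx : t = x
      · subst htx
        have hmem : t ∈ PySem.Set.add seen t := (PySem.Set.mem_add _ _ _).2 (Or.inr rfl)
        rw [if_pos ((PySem.Set.contains_iff _ _).2 hmem),
            if_neg hx, PySem.List.index?_cons_self,
            PySem.Dict.getD_modify_self]
        show occ.getD t [] ++ [(si, s)] = occ.getD t [] ++ [(si, s + ((0 : Nat) : Int))]
        simp
      · have hc : PySem.Set.contains (PySem.Set.add seen x) t = PySem.Set.contains seen t := by
          rw [PySem.Set.add_eq_ite]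
          split
          · rfl
          · simp [PySem.Set.contains_eq_listContains, htx]
        have hmod : (occ.modify x [] (· ++ [(si, s)])).getD t [] = occ.getD t [] := by
          rw [PySem.Dict.getD_modify, if_neg htx]
        rw [hc, hmod, PySem.List.index?_cons_of_ne xs (Ne.symm htx), hitList_map_succ]

-- A's positions for token t over the sentences enumerated from s
def posFrom (t : String) (lts : List (List String)) (s : Int) : List (Int × Int) :=
  ((PySem.List.enumerate lts s).filter (fun p => p.2.contains t)).map
    (fun p => (p.1, (((PySem.List.index? p.2 t).getD 0 : Nat) : Int)))

-- B's outer loop, characterised: it accumulates exactly A's position lists.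
theorem fold_sentences_getD (lts : List (List String)) :
    ∀ (s : Int) (occ : PySem.Dict String (List (Int × Int))) (t : String),
    (((PySem.List.enumerate lts s).foldl (fun occ p => plSentence p.1 p.2 occ) occ).getD t []) =
      occ.getD t [] ++ posFrom t lts s := by
  induction lts with
  | nil => intro s occ t; simp [PySem.List.enumerate_nil, posFrom]
  | cons sen rest ih =>
    intro s occ t
    rw [PySem.List.enumerate_cons]
    simp only [List.foldl_cons]
    rw [ih]
    have hone : (plSentence s sen occ).getD t [] =
        occ.getD t [] ++ hitList s 0 (PySem.List.index? sen t) := by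
      rw [plSentence, plStep_fold_getD]
      rw [if_neg (by simp [PySem.Set.contains_eq_listContains, PySem.Set.empty])]
    rw [hone]
    have hpos : posFrom t (sen :: rest) s =
        hitList s 0 (PySem.List.index? sen t) ++ posFrom t rest (s + 1) := by
      rw [posFrom, PySem.List.enumerate_cons, List.filter_cons]
      by_cases hmem : t ∈ sen
      · rcases Option.isSome_iff_exists.1 ((PySem.List.index?_isSome_iff sen t).2 hmem)
          with ⟨k, hk⟩
        have hk' : List.idxOf? t sen = some k := by
          rw [← PySem.List.index?_eq_idxOf?]; exact hk
        simp [hmem, hk', hitList, posFrom]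
      · have hn : PySem.List.index? sen t = none :=
          (PySem.List.index?_eq_none_iff sen t).2 hmem
        have hn' : List.idxOf? t sen = none := by
          rw [← PySem.List.index?_eq_idxOf?]; exact hn
        simp [hmem, hn', hitList, posFrom]
    rw [hpos, List.append_assoc]

-- both result dicts are built by inserting equal values for equal keys
theorem foldl_insert_congr (f g : String → List (Int × Int)) (h : ∀ n, f n = g n) :
    ∀ (stk : List String) (d : PySem.Dict String (List (Int × Int))),
    stk.foldl (fun d n => d.insert n (f n)) d = stk.foldl (fun d n => d.insert n (g n)) d := by
  intro stk
  induction stk with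
  | nil => intro d; rfl
  | cons n rest ih => intro d; simp only [List.foldl_cons, h n, ih]

-- ===== VERDICT (by name: the statement is the Claim_ definition above) =====
theorem position_list_spec : Claim_equal_position_list := by
  intro stk lts _
  unfold Spec_position_list position_list position_list_alt
  congr 1
  apply foldl_insert_congr
  intro n
  rw [PySem.List.foldl_append_if, fold_sentences_getD]
  simp [posFrom, PySem.Dict.getD_empty]
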